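-- pv_equiv track=rewrite | github.com/vinoopt/inboxscore-ai | checks.py | _candidate_apex_domains
-- ===== SOURCE A (Python) =====
-- def _candidate_apex_domains(domain: str) -> list:
--     """Return apex-domain candidates from longest to shortest, for RDAP retry.
--
--     INBOX-78 fix: RDAP servers only know about registered (apex) domains,
--     not subdomains. e.g. redrail.redbus.com → 404, but redbus.com → 200.
--     We try the full input first (handles edge cases where the input is
--     already an apex), then walk up the labels until we have 2 parts left.
--
--     >>> _candidate_apex_domains('redrail.redbus.com')
--     ['redrail.redbus.com', 'redbus.com']
--     >>> _candidate_apex_domains('foo.bar.example.com')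
--     ['foo.bar.example.com', 'bar.example.com', 'example.com']
--     >>> _candidate_apex_domains('example.com')
--     ['example.com']
--     """
--     parts = domain.lower().strip(".").split(".")
--     if len(parts) <= 2:
--         return [domain.lower().strip(".")]
--     candidates = []
--     for i in range(len(parts) - 1):
--         # Stop when only 2 labels remain (apex.tld); shorter would be just a TLD
--         if len(parts) - i < 2:
--             break
--         candidates.append(".".join(parts[i:]))
--     return candidates
-- ===== SOURCE B (Python) =====
-- def _candidate_apex_domains(domain: str) -> list:
--     """Right-to-left accumulation: build each candidate by prepending one label
--     to a running suffix string, then reverse, instead of re-slicing/re-joining."""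
--     norm = domain.lower().strip(".")
--     labels = norm.split(".")
--     if len(labels) <= 2:
--         return [norm]
--     out = []
--     suffix = labels[-2] + "." + labels[-1]
--     out.append(suffix)
--     for label in reversed(labels[:-2]):
--         suffix = label + "." + suffix
--         out.append(suffix)
--     out.reverse()
--     return out
-- ===== Notes on version B (the rewrite author's own statement) =====
-- stated objective: alternative
-- what changed: Instead of re-slicing the label list and re-joining it for every start index, B walks the labels right-to-left once, maintaining a running suffix string that each earlier label is prepended to, and reverses the collected list at the end.
import Mathlib
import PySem

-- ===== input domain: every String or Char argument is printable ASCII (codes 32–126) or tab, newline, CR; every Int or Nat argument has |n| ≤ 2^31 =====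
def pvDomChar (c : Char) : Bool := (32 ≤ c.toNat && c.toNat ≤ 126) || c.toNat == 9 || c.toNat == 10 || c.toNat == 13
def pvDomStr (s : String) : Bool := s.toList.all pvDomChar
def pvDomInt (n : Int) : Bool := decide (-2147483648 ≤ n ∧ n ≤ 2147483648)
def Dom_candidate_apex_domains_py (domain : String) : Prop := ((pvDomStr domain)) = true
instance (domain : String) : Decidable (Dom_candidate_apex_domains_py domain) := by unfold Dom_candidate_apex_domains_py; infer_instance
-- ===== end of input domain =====

-- B rebuilds each candidate by prepending one label to a running suffix (right-to-left
-- accumulation) instead of re-slicing and re-joining the label list for every i; return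
-- values agree everywhere (alternative decomposition, no mutation involved).

-- ===== PORT A =====
-- A's loop 'for i in range(len(parts)-1): if len(parts)-i < 2: break; candidates.append(".".join(parts[i:]))'
def candidateLoopA (parts : List String) : List Int → List String → List String
  | [], acc => acc
  | i :: rest, acc =>
    if (parts.length : Int) - i < 2 then acc
    else candidateLoopA parts rest
      (acc ++ [PySem.Str.join "." (PySem.List.slice parts (some i) none)])

def candidate_apex_domains_py (domain : String) : List String :=
  let parts := (PySem.Str.split? (PySem.Str.stripChars (PySem.Str.lower domain) ".") ".").getD []
  if parts.length ≤ 2 then [PySem.Str.stripChars (PySem.Str.lower domain) "."]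
  else candidateLoopA parts (PySem.List.pyRange 0 ((parts.length : Int) - 1) 1) []

-- ===== PORT B =====
-- B's loop 'for label in reversed(labels[:-2]): suffix = label + "." + suffix; out.append(suffix)'
def suffixLoopB : List String → String → List String → List String
  | [], _, out => out
  | l :: rest, suffix, out =>
    let s := PySem.Str.join "." [l, suffix]
    suffixLoopB rest s (out ++ [s])

def candidate_apex_domains_py_alt (domain : String) : List String :=
  let norm := PySem.Str.stripChars (PySem.Str.lower domain) "."
  let labels := (PySem.Str.split? norm ".").getD []
  if labels.length ≤ 2 then [norm]
  else
    let s0 := PySem.Str.join "."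
      [PySem.List.pyGetD labels (-2) "", PySem.List.pyGetD labels (-1) ""]
    (suffixLoopB ((PySem.List.slice labels none (some (-2))).reverse) s0 [s0]).reverse

-- ===== PRECONDITION & SPEC =====
def Spec_candidate_apex_domains_py (domain : String) (out : List String) : Prop := out = candidate_apex_domains_py_alt domain
instance (domain : String) (out : List String) : Decidable (Spec_candidate_apex_domains_py domain out) := by unfold Spec_candidate_apex_domains_py; infer_instance

-- ===== CLAIM (what is proved, stated in full; the proofs are below) =====
def Claim_equal_candidate_apex_domains_py : Prop := ∀ (domain : String), Dom_candidate_apex_domains_py domain → Spec_candidate_apex_domains_py domain (candidate_apex_domains_py domain)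

-- ===== LEMMAS AND PROOFS =====

-- the chain of dot-joined suffixes of xs, longest first, down to length 2
def suffixChain : List String → List String
  | [] => []
  | [_] => []
  | x :: y :: rest => PySem.Str.join "." (x :: y :: rest) :: suffixChain (y :: rest)

-- the suffixes B's loop appends, in append order, starting from tail t
def sufList : List String → List String → List String
  | [], _ => []
  | r :: rs, t => PySem.Str.join "." (r :: t) :: sufList rs (r :: t)

theorem join_dot_cons (r : String) (t : List String) (ht : t ≠ []) :
    PySem.Str.join "." [r, PySem.Str.join "." t] = PySem.Str.join "." (r :: t) := by
  obtain ⟨y, rest, rfl⟩ : ∃ y rest, t = y :: rest := by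
    cases t with
    | nil => exact absurd rfl ht
    | cons y rest => exact ⟨y, rest, rfl⟩
  apply String.toList_injective
  simp only [PySem.Str.toList_join, List.map, PySem.Chars.join_cons_cons,
    PySem.Chars.join_singleton]

theorem suffixChain_short (xs : List String) (h : xs.length ≤ 1) : suffixChain xs = [] := by
  match xs with
  | [] => rfl
  | [_] => rfl
  | _ :: _ :: _ => simp at h

theorem suffixChain_cons (r : String) (t : List String) (ht : 1 ≤ t.length) :
    suffixChain (r :: t) = PySem.Str.join "." (r :: t) :: suffixChain t := by
  match t with
  | [] => simp at ht
  | _ :: _ => rfl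

theorem suffixLoopB_spec (rs : List String) : ∀ (t : List String) (out : List String),
    t ≠ [] → suffixLoopB rs (PySem.Str.join "." t) out = out ++ sufList rs t := by
  induction rs with
  | nil => intro t out ht; simp [suffixLoopB, sufList]
  | cons r rs ih =>
    intro t out ht
    simp only [suffixLoopB, sufList]
    rw [join_dot_cons r t ht, ih (r :: t) _ (List.cons_ne_nil r t)]
    simp

theorem sufList_suffixChain (rs : List String) : ∀ (t : List String), 2 ≤ t.length →
    (sufList rs t).reverse ++ suffixChain t = suffixChain (rs.reverse ++ t) := by
  induction rs with
  | nil => intro t ht; simp [sufList]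
  | cons r rs ih =>
    intro t ht
    have hrev : (sufList (r :: rs) t).reverse
        = (sufList rs (r :: t)).reverse ++ [PySem.Str.join "." (r :: t)] := by
      simp [sufList]
    rw [hrev, List.append_assoc, List.singleton_append, ← suffixChain_cons r t (by omega),
      ih (r :: t) (by simp; omega)]
    simp

theorem candidateLoopA_spec (k : Nat) : ∀ (labels : List String) (a : Nat) (acc : List String),
    labels.length - 1 = a + k →
    candidateLoopA labels (PySem.List.pyRange (a : Int) ((labels.length : Int) - 1) 1) acc
      = acc ++ suffixChain (labels.drop a) := by
  induction k with
  | zero =>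
    intro labels a acc hk
    rw [PySem.List.pyRange_one_eq_nil (by omega)]
    rw [suffixChain_short (labels.drop a) (by simp; omega)]
    simp [candidateLoopA]
  | succ k ih =>
    intro labels a acc hk
    have ha : a < labels.length - 1 := by omega
    rw [PySem.List.pyRange_one_cons (by omega)]
    simp only [candidateLoopA]
    rw [if_neg (by omega)]
    rw [PySem.List.slice_from_natCast]
    have : ((a : Int) + 1) = ((a + 1 : Nat) : Int) := by push_cast; ring
    rw [this, ih labels (a + 1) _ (by omega)]
    have hdrop : labels.drop a = labels[a] :: labels.drop (a + 1) :=
      List.drop_eq_getElem_cons (by omega)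
    rw [hdrop, suffixChain_cons _ _ (by simp; omega), ← hdrop]
    simp

theorem main_branch (labels : List String) (h : 3 ≤ labels.length) :
    candidateLoopA labels (PySem.List.pyRange 0 ((labels.length : Int) - 1) 1) []
      = (suffixLoopB ((PySem.List.slice labels none (some (-2))).reverse)
          (PySem.Str.join "."
            [PySem.List.pyGetD labels (-2) "", PySem.List.pyGetD labels (-1) ""])
          [PySem.Str.join "."
            [PySem.List.pyGetD labels (-2) "", PySem.List.pyGetD labels (-1) ""]]).reverse := by
  have h0 : ((0 : Nat) : Int) = (0 : Int) := rfl
  have hA := candidateLoopA_spec (labels.length - 1) labels 0 [] (by omega)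
  rw [h0] at hA
  rw [hA, List.drop_zero, List.nil_append]
  -- identify the tail [labels[-2], labels[-1]] with drop (length - 2)
  have htail : labels.drop (labels.length - 2)
      = [labels[labels.length - 2], labels[labels.length - 1]] := by
    rw [List.drop_eq_getElem_cons (by omega)]
    have : labels.length - 2 + 1 = labels.length - 1 := by omega
    rw [this, List.drop_eq_getElem_cons (by omega)]
    have : labels.length - 1 + 1 = labels.length := by omega
    rw [this, List.drop_length]
  rw [PySem.List.pyGetD_neg_ofNat labels 2 "" (by omega) (by omega)]
  rw [PySem.List.pyGetD_neg_ofNat labels 1 "" (by omega) (by omega)]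
  rw [PySem.List.slice_to_neg_ofNat labels 2 (by omega)]
  have hJ : PySem.Str.join "." [labels[labels.length - 2], labels[labels.length - 1]]
      = PySem.Str.join "." (labels.drop (labels.length - 2)) := by rw [htail]
  rw [hJ, suffixLoopB_spec _ _ _ (by rw [htail]; simp)]
  have hchain : suffixChain (labels.drop (labels.length - 2))
      = [PySem.Str.join "." (labels.drop (labels.length - 2))] := by
    rw [htail]; rfl
  have hS := sufList_suffixChain ((labels.take (labels.length - 2)).reverse)
    (labels.drop (labels.length - 2)) (by rw [htail]; simp)
  rw [List.reverse_reverse, hchain, List.take_append_drop] at hS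
  rw [List.singleton_append, List.reverse_cons, hS]

-- ===== VERDICT (by name: the statement is the Claim_ definition above) =====
theorem candidate_apex_domains_py_spec : Claim_equal_candidate_apex_domains_py := by
  intro domain _
  unfold Spec_candidate_apex_domains_py
  unfold candidate_apex_domains_py candidate_apex_domains_py_alt
  simp only []
  split_ifs with h
  · rfl
  · exact main_branch _ (by omega)
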